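-- pv_equiv track=rewrite | github.com/chae-yoon/algorithm | 프로그래머스/lv0/120853. 컨트롤 제트/컨트롤 제트.py | solution
-- ===== SOURCE A (Python) =====
-- def solution(s):
--     string = s.split()
--     answer = 0
--
--     for index in range(len(string)-1):
--         if string[index+1] == 'Z':
--             continue
--
--         if string[index] == 'Z':
--             continue
--
--         answer += int(string[index])
--
--     answer += int(string[-1]) if string[-1] != 'Z' else 0
--
--     return answer
-- ===== SOURCE B (Python) =====
-- def solution(s):
--     tokens = s.split()
--     total = sum(int(t) for t in tokens if t != 'Z')
--     for prev, cur in zip(tokens, tokens[1:]):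
--         if cur == 'Z' and prev != 'Z':
--             total -= int(prev)
--     return total
-- ===== Notes on version B (the rewrite author's own statement) =====
-- stated objective: alternative
-- what changed: Replaces A's index loop with lookahead string[index+1] plus a separate last-element term by a sum-all-then-correct decomposition: total of all non-cancel tokens, then one pass over adjacent pairs (zip) subtracting each value directly followed by the cancel token Z.
-- outside the precondition, e.g. on solution('x Z 3'): A returns 3, B raises ValueError; on solution('abc Z'): A returns 0, B raises ValueError
import Mathlib
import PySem

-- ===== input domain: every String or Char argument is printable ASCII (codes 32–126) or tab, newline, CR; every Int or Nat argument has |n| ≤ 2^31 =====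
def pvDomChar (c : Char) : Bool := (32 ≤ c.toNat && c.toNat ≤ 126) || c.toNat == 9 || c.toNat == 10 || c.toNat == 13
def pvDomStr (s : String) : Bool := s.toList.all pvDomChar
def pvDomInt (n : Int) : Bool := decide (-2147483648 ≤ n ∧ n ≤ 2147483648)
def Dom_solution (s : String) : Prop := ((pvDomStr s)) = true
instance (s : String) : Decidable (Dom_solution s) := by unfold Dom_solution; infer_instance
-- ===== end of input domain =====

-- B re-implements A as sum-all-then-correct over adjacent pairs (no index loop); objective: alternative decomposition, same cost.

-- int(t); Pre_solution guarantees the parse succeeds wherever the ports apply it, so the default 0 is never observed.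
def pvVal (t : String) : Int := (PySem.Int.ofStr? t).getD 0

-- ===== PORT A =====
def solution (s : String) : Int :=
  let string := PySem.Str.split₀ s
  let answer : Int :=
    (PySem.List.pyRange 0 ((string.length : Int) - 1) 1).foldl
      (fun answer index =>
        if PySem.List.pyGetD string (index + 1) "" = "Z" then answer
        else if PySem.List.pyGetD string index "" = "Z" then answer
        else answer + pvVal (PySem.List.pyGetD string index "")) 0
  answer + (if PySem.List.pyGetD string (-1) "" ≠ "Z" then pvVal (PySem.List.pyGetD string (-1) "") else 0)

-- ===== PORT B =====
def solution_alt (s : String) : Int :=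
  let tokens := PySem.Str.split₀ s
  let total : Int := ((tokens.filter (fun t => t ≠ "Z")).map pvVal).sum
  (tokens.zip (PySem.List.slice tokens (some 1) none)).foldl
    (fun total pc => if pc.2 = "Z" ∧ pc.1 ≠ "Z" then total - pvVal pc.1 else total) total

-- ===== PRECONDITION & SPEC =====
-- Pre_ excludes (a) whitespace-only s, where A raises IndexError on string[-1], and (b) strings containing a
-- non-integer token other than the cancel token Z, where A can still return (it never parses a token directly
-- followed by the cancel token) but B parses every non-cancel token and raises ValueError.
def Pre_solution (s : String) : Prop :=
  PySem.Str.split₀ s ≠ [] ∧ ∀ t ∈ PySem.Str.split₀ s, t ≠ "Z" → (PySem.Int.ofStr? t).isSome = true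
instance (s : String) : Decidable (Pre_solution s) := by unfold Pre_solution; infer_instance
def pvWitness_solution : String := "1 2 Z 3"

def Spec_solution (s : String) (out : Int) : Prop := out = solution_alt s
instance (s : String) (out : Int) : Decidable (Spec_solution s out) := by unfold Spec_solution; infer_instance

-- ===== CLAIM (what is proved, stated in full; the proofs are below) =====
def Claim_equal_solution : Prop := ∀ (s : String), Dom_solution s → Pre_solution s → Spec_solution s (solution s)

-- ===== LEMMAS AND PROOFS =====

-- A's loop body, on adjacent pairs
def pvFA (a : Int) (p : String × String) : Int :=
  if p.2 = "Z" then a else if p.1 = "Z" then a else a + pvVal p.1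

-- B's loop body
def pvFB (a : Int) (p : String × String) : Int :=
  if p.2 = "Z" ∧ p.1 ≠ "Z" then a - pvVal p.1 else a

lemma pvFA_shift (ps : List (String × String)) : ∀ a : Int, ps.foldl pvFA a = a + ps.foldl pvFA 0 := by
  induction ps with
  | nil => simp
  | cons p t ih =>
      intro a
      simp only [List.foldl_cons, ih (pvFA a p), ih (pvFA 0 p)]
      unfold pvFA; split_ifs <;> ring

lemma pvFB_shift (ps : List (String × String)) : ∀ a : Int, ps.foldl pvFB a = a + ps.foldl pvFB 0 := by
  induction ps with
  | nil => simp
  | cons p t ih =>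
      intro a
      simp only [List.foldl_cons, ih (pvFB a p), ih (pvFB 0 p)]
      unfold pvFB; split_ifs <;> ring

-- last-token term of A
def pvLast (l : List String) (h : l ≠ []) : Int :=
  if l.getLast h ≠ "Z" then pvVal (l.getLast h) else 0

-- core: A's pair fold plus its last-token term equals B's grand total plus B's correction fold
lemma pvCore : ∀ (l : List String) (x : String),
    ((x :: l).zip l).foldl pvFA 0 + pvLast (x :: l) (by simp)
      = (((x :: l).filter (fun t => t ≠ "Z")).map pvVal).sum + ((x :: l).zip l).foldl pvFB 0 := by
  intro l
  induction l with
  | nil =>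
      intro x
      unfold pvLast
      by_cases hx : x = "Z"
      · simp [hx]
      · simp [hx]
  | cons y t ih =>
      intro x
      have hzip : ((x :: y :: t).zip (y :: t)) = (x, y) :: ((y :: t).zip t) := rfl
      have hlast : pvLast (x :: y :: t) (by simp) = pvLast (y :: t) (by simp) := by
        simp [pvLast, List.getLast_cons]
      have hS : ((((x :: y :: t)).filter (fun t => t ≠ "Z")).map pvVal).sum
          = (if x = "Z" then 0 else pvVal x) + (((y :: t).filter (fun t => t ≠ "Z")).map pvVal).sum := by
        by_cases hx : x = "Z" <;> simp [List.filter_cons, hx]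
      rw [hzip, List.foldl_cons, List.foldl_cons, pvFA_shift _ (pvFA 0 (x, y)),
        pvFB_shift _ (pvFB 0 (x, y)), hlast, hS]
      have hih := ih y
      by_cases hx : x = "Z" <;> by_cases hy : y = "Z" <;>
        simp [pvFA, pvFB, hx, hy] at hih ⊢ <;> omega

-- ===== VERDICT (by name: the statement is the Claim_ definition above) =====
theorem solution_spec : Claim_equal_solution := by
  unfold Claim_equal_solution
  intro s _hdom hpre
  unfold Spec_solution solution solution_alt
  obtain ⟨hne, -⟩ := hpre
  obtain ⟨x, l, hxl⟩ : ∃ x l, PySem.Str.split₀ s = x :: l := by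
    cases h : PySem.Str.split₀ s with
    | nil => exact absurd h hne
    | cons a b => exact ⟨a, b, rfl⟩
  simp only [hxl]
  set L : List String := x :: l with hL
  have hzlen : (((L.zip L.tail).length : Int)) = (L.length : Int) - 1 := by
    simp [List.length_zip, hL]
  -- A's index loop is a fold over adjacent pairs
  have hbody : (PySem.List.pyRange 0 ((L.length : Int) - 1) 1).foldl
      (fun answer index =>
        if PySem.List.pyGetD L (index + 1) "" = "Z" then answer
        else if PySem.List.pyGetD L index "" = "Z" then answer
        else answer + pvVal (PySem.List.pyGetD L index "")) 0
      = (L.zip L.tail).foldl pvFA 0 := by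
    rw [← hzlen]
    rw [PySem.List.foldl_congr_mem (g := fun acc index => pvFA acc (PySem.List.pyGetD (L.zip L.tail) index ("", "")))]
    · exact PySem.List.foldl_pyRange_zero_pyGetD' (L.zip L.tail) ("", "") pvFA 0
    · intro acc index hmem
      rw [PySem.List.mem_pyRange_one] at hmem
      obtain ⟨h0, h1⟩ := hmem
      obtain ⟨i, rfl⟩ : ∃ i : Nat, index = (i : Int) := ⟨index.toNat, by omega⟩
      have hi : i < (L.zip L.tail).length := by exact_mod_cast h1
      have hiL : i < L.length := by
        simp only [List.length_zip, List.length_tail] at hi; omega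
      have hiT : i < L.tail.length := by
        simp only [List.length_zip, List.length_tail] at hi ⊢; omega
      have e1 : PySem.List.pyGetD (L.zip L.tail) (i : Int) ("", "")
          = (L[i]'hiL, L.tail[i]'hiT) := by
        rw [PySem.List.pyGetD_natCast, List.getD_eq_getElem _ _ hi]
        exact List.getElem_zip ..
      have e2 : PySem.List.pyGetD L (i : Int) "" = L[i]'hiL := by
        rw [PySem.List.pyGetD_natCast, List.getD_eq_getElem _ _ hiL]
      have e3 : PySem.List.pyGetD L ((i : Int) + 1) "" = L.tail[i]'hiT := by
        have hiL1 : i + 1 < L.length := by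
          simp only [List.length_tail] at hiT; omega
        rw [show ((i : Int) + 1) = (((i + 1 : Nat)) : Int) from by push_cast; ring,
          PySem.List.pyGetD_natCast, List.getD_eq_getElem _ _ hiL1]
        simp [List.getElem_tail]
      rw [e1, e2, e3]
      rfl
  rw [show PySem.List.slice L (some 1) none = L.tail from PySem.List.slice_from_one L]
  rw [hbody]
  have hlastD : PySem.List.pyGetD L (-1) "" = L.getLast (by simp [hL]) :=
    PySem.List.pyGetD_neg_one _ _ (by simp [hL])
  rw [hlastD]
  rw [show (fun (total : Int) (pc : String × String) =>
        if pc.2 = "Z" ∧ pc.1 ≠ "Z" then total - pvVal pc.1 else total) = pvFB from by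
      funext a p; rfl]
  rw [pvFB_shift]
  have hcore := pvCore l x
  have htail : L.tail = l := rfl
  rw [htail]
  unfold pvLast at hcore
  simp only [hL] at hcore ⊢
  omega
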